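-- pv_equiv track=rewrite | github.com/A-meerdervan/RushHourGit | Gezamenlijk/DepthFirst(ParentMethodeEn3100oplossingen)/rushhour_allMoves.py | optionIsSolution
-- ===== SOURCE A (Python) =====
-- def optionIsSolution(state,occupied):
-- 	#checkt nog te veel maar Alex zeurt
-- 	# print occupied
-- 	arraycounter =[]
-- 	EXIT = 22
-- 	counter = 1
-- 	# print state[-1]
-- 	while state[-1] < EXIT:
-- 		counter += 1
-- 		arraycounter.append(counter)
-- 		state[-1] += 1
-- 	state[-1] = state[-1] - counter + 1
-- 	# print arraycounter
--
-- 	for number in arraycounter: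
-- 		# print number,state[-1]
-- 		tileCheck = state[-1] + number
-- 		# print tileCheck
-- 		if tileCheck in occupied:
-- 			#print 'false'
-- 			return False
-- 	#print 'hier'
-- 	return True
-- ===== SOURCE B (Python) =====
-- def optionIsSolution(state, occupied):
--     # Invert the scan: instead of walking every tile ahead of the red car and
--     # testing membership in `occupied`, walk `occupied` once and test whether any
--     # occupied tile lies between the tile in front of the car and the exit tile 23.
--     # No mutation of state (A's in-place mutations net to zero).
--     start = state[-1]
--     for t in occupied:
--         if start + 2 <= t <= 23:
--             return False
--     return True
-- ===== Notes on version B (the rewrite author's own statement) =====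
-- stated objective: faster
-- what changed: Inverted the iteration: A simulates the car with a mutate-and-restore while loop building an arraycounter, then for each tile ahead does a linear membership scan of occupied (O(k*m)); B makes one pass over occupied testing the interval condition start+2 <= t <= 23, no range walk, no membership scan, no mutation.
import Mathlib
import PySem

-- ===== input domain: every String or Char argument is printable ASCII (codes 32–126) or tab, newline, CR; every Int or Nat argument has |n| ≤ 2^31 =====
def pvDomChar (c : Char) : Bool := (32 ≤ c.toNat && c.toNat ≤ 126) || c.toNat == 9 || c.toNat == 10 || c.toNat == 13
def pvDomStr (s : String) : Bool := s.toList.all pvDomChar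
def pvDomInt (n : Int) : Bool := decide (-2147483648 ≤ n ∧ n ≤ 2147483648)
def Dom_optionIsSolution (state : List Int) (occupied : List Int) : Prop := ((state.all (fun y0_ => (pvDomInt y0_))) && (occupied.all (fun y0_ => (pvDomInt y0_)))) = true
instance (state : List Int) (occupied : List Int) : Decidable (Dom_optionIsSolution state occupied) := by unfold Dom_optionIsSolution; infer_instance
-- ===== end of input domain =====

-- B inverts the iteration (one pass over occupied with an interval test instead of
-- A's per-tile membership scans); A mutates state in place but the mutations net to
-- zero, so the return-value equivalence proved here captures the observable behaviour.

-- ===== PORT A =====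
-- while state[-1] < 22: counter += 1; arraycounter.append(counter); state[-1] += 1
-- (state[-1] modelled as the local s; A restores it afterwards)
def pvWhileA (s counter : Int) (arr : List Int) : Int × Int × List Int :=
  if s < 22 then pvWhileA (s + 1) (counter + 1) (arr ++ [counter + 1])
  else (s, counter, arr)
  termination_by (22 - s).toNat
  decreasing_by omega

-- for number in arraycounter: if state[-1] + number in occupied: return False / return True
def pvForA (base : Int) (arr : List Int) (occupied : List Int) : Bool :=
  match arr with
  | [] => true
  | n :: rest => if occupied.contains (base + n) then false else pvForA base rest occupied

def optionIsSolution (state : List Int) (occupied : List Int) : Bool :=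
  match PySem.List.pyGet? state (-1) with
  | none => false   -- IndexError on empty state; excluded by Pre_
  | some s0 =>
    let r := pvWhileA s0 1 []
    -- state[-1] = state[-1] - counter + 1
    let base := r.1 - r.2.1 + 1
    pvForA base r.2.2 occupied

-- ===== PORT B =====
-- for t in occupied: if start + 2 <= t <= 23: return False / return True
def pvScanB (start : Int) (occ : List Int) : Bool :=
  match occ with
  | [] => true
  | t :: rest => if start + 2 ≤ t ∧ t ≤ 23 then false else pvScanB start rest

def optionIsSolution_alt (state : List Int) (occupied : List Int) : Bool :=
  match PySem.List.pyGet? state (-1) with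
  | none => false   -- IndexError on empty state; excluded by Pre_
  | some start => pvScanB start occupied

-- ===== PRECONDITION & SPEC =====
-- Pre_ excludes only the empty state list, where Python A raises IndexError on state[-1].
def Pre_optionIsSolution (state : List Int) (occupied : List Int) : Prop := state ≠ []
instance (state : List Int) (occupied : List Int) : Decidable (Pre_optionIsSolution state occupied) := by unfold Pre_optionIsSolution; infer_instance
def pvWitness_optionIsSolution : List Int × List Int := ([3, 17], [5, 20, 23])

def Spec_optionIsSolution (state : List Int) (occupied : List Int) (out : Bool) : Prop := out = optionIsSolution_alt state occupied
instance (state : List Int) (occupied : List Int) (out : Bool) : Decidable (Spec_optionIsSolution state occupied out) := by unfold Spec_optionIsSolution; infer_instance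

-- ===== CLAIM =====
def Claim_equal_optionIsSolution : Prop := ∀ (state : List Int) (occupied : List Int), Dom_optionIsSolution state occupied → Pre_optionIsSolution state occupied → Spec_optionIsSolution state occupied (optionIsSolution state occupied)

-- ===== LEMMAS AND PROOFS =====

-- closed form of A's while loop
theorem pvWhileA_spec (s c : Int) (arr : List Int) :
    pvWhileA s c arr =
      (if s < 22 then 22 else s, c + ((22 - s).toNat : Int),
        arr ++ PySem.List.pyRange (c + 1) (c + 1 + ((22 - s).toNat : Int)) 1) := by
  generalize hk : (22 - s).toNat = k
  induction k generalizing s c arr with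
  | zero =>
    rw [pvWhileA]
    have hs : ¬ s < 22 := by omega
    rw [PySem.List.pyRange_one_eq_nil (by omega)]
    simp [hs]
  | succ k ih =>
    rw [pvWhileA]
    have hs : s < 22 := by omega
    have hk' : (22 - (s + 1)).toNat = k := by omega
    rw [if_pos hs, ih (s + 1) (c + 1) (arr ++ [c + 1]) hk']
    rw [show (((k + 1 : Nat)) : Int) = (k : Int) + 1 from by push_cast; ring]
    rw [PySem.List.pyRange_one_cons (a := c + 1) (b := c + 1 + ((k : Int) + 1)) (by omega)]
    have h22 : (if s + 1 < 22 then (22 : Int) else s + 1) = 22 := by split <;> omega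
    have hb : c + 1 + 1 + (k : Int) = c + 1 + ((k : Int) + 1) := by ring
    simp [h22, hs, hb, List.append_assoc]
    omega

-- A's for loop as a universal statement over the tiles it checks
theorem pvForA_true_iff (base : Int) (arr occupied : List Int) :
    pvForA base arr occupied = true ↔ ∀ n ∈ arr, (base + n) ∉ occupied := by
  induction arr with
  | nil => simp [pvForA]
  | cons n rest ih =>
    rw [pvForA]
    by_cases h : occupied.contains (base + n) <;>
      simp_all [List.contains_iff_mem]

-- B's scan as a universal statement over occupied
theorem pvScanB_true_iff (start : Int) (occ : List Int) :
    pvScanB start occ = true ↔ ∀ t ∈ occ, ¬ (start + 2 ≤ t ∧ t ≤ 23) := by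
  induction occ with
  | nil => simp [pvScanB]
  | cons t rest ih =>
    rw [pvScanB]
    by_cases h : start + 2 ≤ t ∧ t ≤ 23 <;> simp_all <;> intros <;> omega

-- ===== VERDICT =====
theorem optionIsSolution_spec : Claim_equal_optionIsSolution := by
  intro state occupied _ hpre
  unfold Spec_optionIsSolution optionIsSolution optionIsSolution_alt
  cases hg : PySem.List.pyGet? state (-1) with
  | none => rfl
  | some s0 =>
    simp only [pvWhileA_spec]
    have hbase : (if s0 < 22 then (22 : Int) else s0) - (1 + ((22 - s0).toNat : Int)) + 1 = s0 := by
      split <;> omega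
    simp only [hbase, List.nil_append]
    rw [Bool.eq_iff_iff, pvForA_true_iff, pvScanB_true_iff]
    constructor
    · intro hA t ht ⟨h1, h2⟩
      have hn : (t - s0) ∈ PySem.List.pyRange (1 + 1) (1 + 1 + ((22 - s0).toNat : Int)) 1 := by
        rw [PySem.List.mem_pyRange_one]; omega
      exact hA _ hn (by simpa using ht)
    · intro hB n hn hmem
      rw [PySem.List.mem_pyRange_one] at hn
      exact hB _ hmem ⟨by omega, by omega⟩
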